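-- pv_equiv track=rewrite | github.com/moon088/Atcoder | Contest/Regular/DivideString.py | isCut
-- ===== SOURCE A (Python) =====
-- def isCut(top,end,S):
--     if top > end:#単語がない
--         return True,end
--     if end >= len(S)-1: #文字列のけつに到達
--         return (False,0)
--     if ord(S[top]) < ord(S[end+1]): #大きかったら切れる
--         return (True, end)
--     elif ord(S[top]) > ord(S[end+1]): #切れない
--         return (False,0)
--     else:#先頭じゃ判断できない
--         return isCut(top+1,end+1,S)
-- ===== SOURCE B (Python) =====
-- def isCut(top, end, S):
--     if top > end:
--         return True, end
--     n = len(S)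
--     if end >= n - 1:
--         return (False, 0)
--     # compare the segment starting at top with the one starting at end+1,
--     # over the n-1-end steps the scan could take before end hits the last index
--     a = S[top:top + (n - 1 - end)]
--     b = S[end + 1:]
--     for k, (x, y) in enumerate(zip(a, b)):
--         if x != y:
--             return (True, end + k) if x < y else (False, 0)
--     return (False, 0)
-- ===== Notes on version B (the rewrite author's own statement) =====
-- stated objective: alternative
-- what changed: Replaces A's index-stepping tail recursion by slicing the two competing segments once and scanning the zipped character pairs for the first mismatch.
-- outside the precondition, e.g. on isCut(-1, -1, 'ba'): A returns (True, -1), B returns (False, 0); on isCut(-3, 0, 'ab'): A raises IndexError, B returns (False, 0)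
import Mathlib
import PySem

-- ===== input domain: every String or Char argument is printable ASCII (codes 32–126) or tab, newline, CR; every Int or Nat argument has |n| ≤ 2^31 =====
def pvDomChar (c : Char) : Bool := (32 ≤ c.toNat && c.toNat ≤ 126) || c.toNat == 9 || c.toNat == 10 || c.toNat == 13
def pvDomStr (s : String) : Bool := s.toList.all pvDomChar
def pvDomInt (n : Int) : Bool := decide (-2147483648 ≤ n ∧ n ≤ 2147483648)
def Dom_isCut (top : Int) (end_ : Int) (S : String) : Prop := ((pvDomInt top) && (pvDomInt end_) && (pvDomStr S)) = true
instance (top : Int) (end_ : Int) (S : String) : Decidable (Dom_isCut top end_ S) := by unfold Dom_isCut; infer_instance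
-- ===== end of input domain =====

-- B replaces A's index-stepping tail recursion by slicing the two competing segments and
-- scanning the zipped pairs for the first mismatch (objective: alternative decomposition).

-- ===== PORT A =====
-- literal transliteration of A's recursion; the `none` arm of the match is Python's
-- IndexError (S[top] with top below -len(S)) and is excluded by Pre_isCut.
def isCut (top : Int) (end_ : Int) (S : String) : Bool × Int :=
  if top > end_ then (true, end_)
  else if end_ ≥ PySem.Str.len S - 1 then (false, 0)
  else
    match PySem.Str.pyGet? S top, PySem.Str.pyGet? S (end_ + 1) with
    | some a, some b =>
      if a.toNat < b.toNat then (true, end_)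
      else if b.toNat < a.toNat then (false, 0)
      else isCut (top + 1) (end_ + 1) S
    | _, _ => (false, 0)
termination_by (PySem.Str.len S - 1 - end_).toNat
decreasing_by
  simp only [PySem.Str.len_eq] at *
  omega

-- ===== PORT B =====
-- the 'for k, (x, y) in enumerate(zip(a, b))' loop of Source B
def isCutScan (end_ : Int) : List (Int × (Char × Char)) → Bool × Int
  | [] => (false, 0)
  | (k, (x, y)) :: rest =>
      if x ≠ y then (if x < y then (true, end_ + k) else (false, 0))
      else isCutScan end_ rest

def isCut_alt (top : Int) (end_ : Int) (S : String) : Bool × Int :=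
  if top > end_ then (true, end_)
  else
    let n := PySem.Str.len S
    if end_ ≥ n - 1 then (false, 0)
    else
      let a := PySem.Str.slice S (some top) (some (top + (n - 1 - end_)))
      let b := PySem.Str.slice S (some (end_ + 1)) none
      isCutScan end_ (PySem.List.enumerate (List.zip a.toList b.toList))

-- ===== PRECONDITION & SPEC =====
-- Pre_ excludes the inputs with a negative `top` that is still index-stepped into S
-- (Python's negative-index wraparound makes A compare S's tail against its head there,
-- an accident of indexing no slicing implementation reproduces) and, inside the same
-- region, top < -len(S), where A raises IndexError.
def Pre_isCut (top : Int) (end_ : Int) (S : String) : Prop :=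
  top > end_ ∨ end_ ≥ PySem.Str.len S - 1 ∨ 0 ≤ top
instance (top : Int) (end_ : Int) (S : String) : Decidable (Pre_isCut top end_ S) := by
  unfold Pre_isCut; infer_instance

def pvWitness_isCut : Int × Int × String := (0, 0, "ab")

def Spec_isCut (top : Int) (end_ : Int) (S : String) (out : Bool × Int) : Prop := out = isCut_alt top end_ S
instance (top : Int) (end_ : Int) (S : String) (out : Bool × Int) : Decidable (Spec_isCut top end_ S out) := by unfold Spec_isCut; infer_instance

-- ===== CLAIM (what is proved, stated in full; the proofs are below) =====
def Claim_equal_isCut : Prop := ∀ (top : Int) (end_ : Int) (S : String), Dom_isCut top end_ S → Pre_isCut top end_ S → Spec_isCut top end_ S (isCut top end_ S)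

-- ===== LEMMAS AND PROOFS =====

-- shifting the enumeration start by one is the same as shifting the base index
lemma isCutScan_shift (end_ k : Int) (l : List (Char × Char)) :
    isCutScan end_ (PySem.List.enumerate l (k + 1)) =
      isCutScan (end_ + 1) (PySem.List.enumerate l k) := by
  induction l generalizing k with
  | nil => rfl
  | cons p rest ih =>
    obtain ⟨x, y⟩ := p
    rw [PySem.List.enumerate_cons, PySem.List.enumerate_cons]
    simp only [isCutScan]
    rw [ih (k + 1)]
    have : end_ + (k + 1) = end_ + 1 + k := by ring
    rw [this]

lemma isCut_eq_alt_main (S : String) : ∀ (m : Nat) (top end_ : Int), 0 ≤ top → top ≤ end_ →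
    (PySem.Str.len S - 1 - end_).toNat = m → isCut top end_ S = isCut_alt top end_ S := by
  intro m
  induction m with
  | zero =>
    intro top end_ h0 hle hm
    have hlen := PySem.Str.len_eq S
    have hend : end_ ≥ PySem.Str.len S - 1 := by omega
    rw [isCut, isCut_alt]
    simp only [if_neg (by omega : ¬ top > end_), if_pos hend]
  | succ m' ih =>
    intro top end_ h0 hle hm
    have hlen := PySem.Str.len_eq S
    have hend : ¬ end_ ≥ PySem.Str.len S - 1 := by omega
    -- indices as naturals
    have htopN : top.toNat < S.toList.length := by omega
    have hendN : (end_ + 1).toNat < S.toList.length := by omega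
    have htop' : top = ((top.toNat : Nat) : Int) := by omega
    have hend' : end_ + 1 = (((end_ + 1).toNat : Nat) : Int) := by omega
    set x := S.toList[top.toNat] with hx
    set y := S.toList[(end_ + 1).toNat] with hy
    have hgx : PySem.Str.pyGet? S top = some x := by
      rw [htop', PySem.Str.pyGet?_natCast]; exact List.getElem?_eq_getElem htopN
    have hgy : PySem.Str.pyGet? S (end_ + 1) = some y := by
      rw [hend', PySem.Str.pyGet?_natCast]; exact List.getElem?_eq_getElem hendN
    -- the two slices of B, as cons lists
    have hsliceA : (PySem.Str.slice S (some top) (some (top + (PySem.Str.len S - 1 - end_)))).toList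
        = x :: List.take m' (List.drop (top.toNat + 1) S.toList) := by
      rw [PySem.Str.toList_slice, PySem.Chars.slice_eq_listSlice,
        PySem.List.slice_toNat S.toList h0 (by omega)]
      have h1 : (top + (PySem.Str.len S - 1 - end_)).toNat - top.toNat = m' + 1 := by omega
      rw [h1, List.drop_eq_getElem_cons htopN, List.take_succ_cons]
    have hsliceB : (PySem.Str.slice S (some (end_ + 1)) none).toList
        = y :: List.drop ((end_ + 1).toNat + 1) S.toList := by
      rw [PySem.Str.toList_slice, PySem.Chars.slice_eq_listSlice,
        PySem.List.slice_from S.toList (by omega)]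
      rw [List.drop_eq_getElem_cons hendN]
    rw [isCut]
    simp only [if_neg (by omega : ¬ top > end_), if_neg hend, hgx, hgy]
    have alt_open : isCut_alt top end_ S =
        isCutScan end_ (PySem.List.enumerate (List.zip
          (x :: List.take m' (List.drop (top.toNat + 1) S.toList))
          (y :: List.drop ((end_ + 1).toNat + 1) S.toList))) := by
      rw [isCut_alt]
      simp only [if_neg (by omega : ¬ top > end_), if_neg hend, hsliceA, hsliceB]
    by_cases hlt : x.toNat < y.toNat
    · rw [if_pos hlt, alt_open]
      rw [List.zip_cons_cons, PySem.List.enumerate_cons]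
      simp only [isCutScan]
      have hne : x ≠ y := by intro h; rw [h] at hlt; omega
      have hxy : x < y := by
        simp only [Char.lt_def]
        exact_mod_cast hlt
      rw [if_pos hne, if_pos hxy]
      norm_num
    · rw [if_neg hlt]
      by_cases hgt : y.toNat < x.toNat
      · rw [if_pos hgt, alt_open]
        rw [List.zip_cons_cons, PySem.List.enumerate_cons]
        simp only [isCutScan]
        have hne : x ≠ y := by intro h; rw [h] at hgt; omega
        have hxy : ¬ x < y := by
          simp only [Char.lt_def]
          intro h
          have : x.toNat < y.toNat := by exact_mod_cast h
          omega
        rw [if_pos hne, if_neg hxy]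
      · rw [if_neg hgt]
        have hxeq : x = y := by
          have hnat : x.toNat = y.toNat := by omega
          exact Char.ext (UInt32.toNat_inj.mp hnat)
        -- A recurses; by IH it equals isCut_alt (top+1) (end_+1) S
        rw [ih (top + 1) (end_ + 1) (by omega) (by omega) (by omega)]
        -- B at (top, end_) steps past the equal head to B at (top+1, end_+1)
        rw [alt_open, List.zip_cons_cons, PySem.List.enumerate_cons]
        simp only [isCutScan, if_neg (by simp [hxeq] : ¬ x ≠ y)]
        rw [show (0 : Int) + 1 = 0 + 1 by ring, isCutScan_shift]
        by_cases hend1 : end_ + 1 ≥ PySem.Str.len S - 1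
        · -- m' = 0 : both sides are (false, 0)
          have hm0 : m' = 0 := by omega
          subst hm0
          rw [isCut_alt]
          simp only [if_neg (by omega : ¬ top + 1 > end_ + 1), if_pos hend1,
            List.take_zero, List.zip_nil_left, PySem.List.enumerate_nil, isCutScan]
        · rw [isCut_alt]
          simp only [if_neg (by omega : ¬ top + 1 > end_ + 1), if_neg hend1]
          have ha' : (PySem.Str.slice S (some (top + 1))
              (some (top + 1 + (PySem.Str.len S - 1 - (end_ + 1))))).toList
              = List.take m' (List.drop (top.toNat + 1) S.toList) := by
            rw [PySem.Str.toList_slice, PySem.Chars.slice_eq_listSlice,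
              PySem.List.slice_toNat S.toList (by omega) (by omega)]
            have h1 : (top + 1 + (PySem.Str.len S - 1 - (end_ + 1))).toNat - (top + 1).toNat = m' := by omega
            have h2 : (top + 1).toNat = top.toNat + 1 := by omega
            rw [h1, h2]
          have hb' : (PySem.Str.slice S (some (end_ + 1 + 1)) none).toList
              = List.drop ((end_ + 1).toNat + 1) S.toList := by
            rw [PySem.Str.toList_slice, PySem.Chars.slice_eq_listSlice,
              PySem.List.slice_from S.toList (by omega)]
            have h2 : (end_ + 1 + 1).toNat = (end_ + 1).toNat + 1 := by omega
            rw [h2]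
          rw [ha', hb']

-- ===== VERDICT (by name: the statement is the Claim_ definition above) =====
theorem isCut_spec : Claim_equal_isCut := by
  intro top end_ S _hdom hpre
  unfold Spec_isCut
  by_cases h1 : top > end_
  · rw [isCut, isCut_alt]; simp only [if_pos h1]
  · by_cases h2 : end_ ≥ PySem.Str.len S - 1
    · rw [isCut, isCut_alt]; simp only [if_neg h1, if_pos h2]
    · have h0 : 0 ≤ top := by
        rcases hpre with h | h | h
        · exact absurd h h1
        · exact absurd h h2
        · exact h
      exact isCut_eq_alt_main S _ top end_ h0 (by omega) rfl
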